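-- pv_equiv track=rewrite | github.com/aviv0102/ProjectsAlone | biu/Machine Learning(Y1-3)/AdvanceML/ex2/structured.py | load_words
-- ===== SOURCE A (Python) =====
-- def load_words(train):
--     words = []
--     word = []
--     y = []
--     for j, example in enumerate(train):
--         word.append(example)
--         y.append(example[1])
--         if example[2] == '-1':
--             words.append((word, y))
--             word = []
--             y = []
--     return words
-- ===== SOURCE B (Python) =====
-- def load_words(train):
--     words = []
--     start = 0
--     for i, example in enumerate(train):
--         if example[2] == '-1':
--             seg = train[start:i + 1]
--             words.append((seg, [e[1] for e in seg]))
--             start = i + 1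
--     return words
-- ===== Notes on version B (the rewrite author's own statement) =====
-- stated objective: alternative
-- what changed: B replaces A's incremental accumulation into two parallel lists (word, y) flushed at each '-1' sentinel by boundary detection: it keeps only a start index, and at each sentinel position i slices the segment train[start:i+1] and derives the label list from the slice in one comprehension.
import Mathlib
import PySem

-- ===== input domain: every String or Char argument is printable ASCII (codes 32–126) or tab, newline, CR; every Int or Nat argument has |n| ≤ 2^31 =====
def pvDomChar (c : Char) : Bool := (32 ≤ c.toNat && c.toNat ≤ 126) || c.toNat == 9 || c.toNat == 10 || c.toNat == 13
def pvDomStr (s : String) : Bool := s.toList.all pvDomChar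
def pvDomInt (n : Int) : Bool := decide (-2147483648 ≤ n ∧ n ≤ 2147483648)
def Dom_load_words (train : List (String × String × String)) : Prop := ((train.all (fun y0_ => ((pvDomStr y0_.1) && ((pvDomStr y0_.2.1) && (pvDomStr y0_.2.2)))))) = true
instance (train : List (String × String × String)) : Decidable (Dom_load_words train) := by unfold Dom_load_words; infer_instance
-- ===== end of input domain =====

-- B replaces A's incremental accumulation into two parallel lists flushed at each '-1'
-- sentinel by boundary detection with a start index and slicing (objective: alternative).

-- ===== PORT A =====
-- A's for-loop over enumerate(train) with state (words, word, y); the index j is unused.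
def load_words (train : List (String × String × String)) : List ((List (String × String × String)) × List String) :=
  ((PySem.List.enumerate train).foldl
    (fun (st : List ((List (String × String × String)) × List String) ×
               List (String × String × String) × List String) p =>
      let word := st.2.1 ++ [p.2]
      let y := st.2.2 ++ [p.2.2.1]
      if p.2.2.2 == "-1" then (st.1 ++ [(word, y)], [], [])
      else (st.1, word, y))
    ([], [], [])).1

-- ===== PORT B =====
-- B's for-loop over enumerate(train) with state (words, start); seg = train[start:i+1].
def load_words_alt (train : List (String × String × String)) : List ((List (String × String × String)) × List String) :=
  ((PySem.List.enumerate train).foldl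
    (fun (st : List ((List (String × String × String)) × List String) × Int) p =>
      if p.2.2.2 == "-1" then
        let seg := PySem.List.slice train (some st.2) (some (p.1 + 1))
        (st.1 ++ [(seg, seg.map (fun e => e.2.1))], p.1 + 1)
      else st)
    ([], 0)).1

-- ===== PRECONDITION & SPEC =====
def Spec_load_words (train : List (String × String × String)) (out : List ((List (String × String × String)) × List String)) : Prop := out = load_words_alt train
instance (train : List (String × String × String)) (out : List ((List (String × String × String)) × List String)) : Decidable (Spec_load_words train out) := by unfold Spec_load_words; infer_instance

-- ===== CLAIM (what is proved, stated in full; the proofs are below) =====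
def Claim_equal_load_words : Prop := ∀ (train : List (String × String × String)), Dom_load_words train → Spec_load_words train (load_words train)

-- ===== LEMMAS AND PROOFS =====

-- slicing train[start:k+1] where k = pre.length picks up the pending prefix plus e
theorem pv_slice_snoc {α : Type} (pre rest : List α) (e : α) (start : Nat)
    (h : start ≤ pre.length) :
    PySem.List.slice (pre ++ e :: rest) (some (start : Int)) (some ((pre.length : Int) + 1))
      = pre.drop start ++ [e] := by
  have hc : ((pre.length : Int) + 1) = ((pre.length + 1 : Nat) : Int) := by push_cast; ring
  rw [hc, PySem.List.slice_natCast, List.drop_append_of_le_length h]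
  have htake : pre.length + 1 - start = (pre.drop start).length + 1 := by
    simp; omega
  rw [htake, List.take_append]
  simp

-- a fold over enumerate whose step ignores the index is a fold over the list
theorem pv_foldl_enumerate_snd {α β : Type} (xs : List α) (s : Int)
    (f : β → α → β) (init : β) :
    (PySem.List.enumerate xs s).foldl (fun st p => f st p.2) init = xs.foldl f init := by
  conv_rhs => rw [← PySem.List.map_snd_enumerate xs s]
  rw [List.foldl_map]

-- loop invariant: B's fold on the remainder, with 'start' pointing at the last flush,
-- equals A's fold carrying the pending segment pre.drop start and its labels
theorem pv_loop_eq (rest : List (String × String × String)) :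
    ∀ (pre : List (String × String × String)) (start : Nat)
      (words : List ((List (String × String × String)) × List String)),
      start ≤ pre.length →
    ((PySem.List.enumerate rest (pre.length)).foldl
      (fun (st : List ((List (String × String × String)) × List String) × Int) p =>
        if p.2.2.2 == "-1" then
          let seg := PySem.List.slice (pre ++ rest) (some st.2) (some (p.1 + 1))
          (st.1 ++ [(seg, seg.map (fun e => e.2.1))], p.1 + 1)
        else st)
      (words, (start : Int))).1
    = (rest.foldl
        (fun (st : List ((List (String × String × String)) × List String) ×
                   List (String × String × String) × List String) e =>
          let word := st.2.1 ++ [e]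
          let y := st.2.2 ++ [e.2.1]
          if e.2.2 == "-1" then (st.1 ++ [(word, y)], [], [])
          else (st.1, word, y))
        (words, pre.drop start, (pre.drop start).map (fun e => e.2.1))).1 := by
  induction rest with
  | nil => intro pre start words _; simp [PySem.List.enumerate]
  | cons e rest ih =>
    intro pre start words h
    rw [PySem.List.enumerate_cons]
    simp only [List.foldl_cons]
    by_cases hs : e.2.2 = "-1"
    · simp only [hs, beq_self_eq_true, if_true]
      have hseg := pv_slice_snoc pre rest e start h
      have this := ih (pre ++ [e]) (pre.length + 1)
        (words ++ [(pre.drop start ++ [e], (pre.drop start ++ [e]).map (fun e => e.2.1))])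
        (by simp)
      have hdrop : (pre ++ [e]).drop (pre.length + 1) = [] := by simp
      rw [hdrop] at this
      rw [hseg]
      simpa only [List.append_assoc, List.cons_append, List.nil_append,
        List.length_append, List.length_cons, List.length_nil, List.map_append,
        List.map_cons, List.map_nil, Nat.cast_add, Nat.cast_one] using this
    · have hbe : (e.2.2 == "-1") = false := by simp [hs]
      simp only [hbe, Bool.false_eq_true, if_false]
      have this := ih (pre ++ [e]) start words (by simp; omega)
      rw [List.drop_append_of_le_length h] at this
      simpa only [List.append_assoc, List.cons_append, List.nil_append,
        List.length_append, List.length_cons, List.length_nil, List.map_append,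
        List.map_cons, List.map_nil, Nat.cast_add, Nat.cast_one] using this

-- ===== VERDICT (by name: the statement is the Claim_ definition above) =====
theorem load_words_spec : Claim_equal_load_words := by
  intro train _
  unfold Spec_load_words load_words load_words_alt
  have hA := pv_foldl_enumerate_snd train 0
    (fun (st : List ((List (String × String × String)) × List String) ×
               List (String × String × String) × List String) e =>
      let word := st.2.1 ++ [e]
      let y := st.2.2 ++ [e.2.1]
      if e.2.2 == "-1" then (st.1 ++ [(word, y)], [], [])
      else (st.1, word, y))
    ([], [], [])
  have hB := pv_loop_eq train [] 0 []
    (by simp)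
  rw [show ((PySem.List.enumerate train (0 : Int)) = PySem.List.enumerate train) from rfl] at hA
  calc ((PySem.List.enumerate train).foldl _ ([], [], [])).1
      = (train.foldl _ ([], [], [])).1 := congrArg Prod.fst hA
    _ = _ := by simpa using hB.symm
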